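-- pv_equiv track=rewrite | github.com/jayanthsai1998/EasyTools | easy_tools/right_leaders.py | leaders_to_right
-- ===== SOURCE A (Python) =====
-- def leaders_to_right(iterable):
--     """
--      Leaders-to-right in the iterable is defined as if an element in the iterable
--      is greater than all other elements to it's right side
--     :param iterable: It should be of either list or tuple types containing numbers
--     :return: list of tuples containing leader element and its index
--     """
--
--     # To check whether the given iterable is list or tuple
--     if type(iterable) == list or type(iterable) == tuple:
--         pass
--     else:
--         raise TypeError("Iterable should be of either list or tuple")
--
--     # To check whether all the given items in the iterable are numbers only
--     for item in iterable:
--         if not isinstance(item, int):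
--             raise ValueError("Only numbers are accepted in the iterable")
--
--     # List to store the right leaders
--     leaders_list = []
--
--     if len(iterable) > 0:
--         leaders_list.append((iterable[-1], len(iterable) - 1))
--
--     for i in range(len(iterable) - 2, -1, -1):
--         if iterable[i] >= leaders_list[-1][0]:
--             leaders_list.append((iterable[i], i))
--
--     return list(reversed(leaders_list))
-- ===== SOURCE B (Python) =====
-- def leaders_to_right(iterable):
--     # Same validation preamble as the original
--     if type(iterable) == list or type(iterable) == tuple:
--         pass
--     else:
--         raise TypeError("Iterable should be of either list or tuple")
--
--     for item in iterable:
--         if not isinstance(item, int):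
--             raise ValueError("Only numbers are accepted in the iterable")
--
--     # Left-to-right monotonic stack: an element is popped as soon as a strictly
--     # greater element appears to its right; what survives is exactly the leaders,
--     # already in increasing index order.
--     stack = []
--     for index, value in enumerate(iterable):
--         while stack and stack[-1][0] < value:
--             stack.pop()
--         stack.append((value, index))
--     return stack
-- ===== Notes on version B (the rewrite author's own statement) =====
-- stated objective: alternative
-- what changed: Replaced the right-to-left running-maximum pass (append-only, then a final reversal) by a left-to-right monotonic stack that pops entries smaller than each new element and needs no reversal.
import Mathlib
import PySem

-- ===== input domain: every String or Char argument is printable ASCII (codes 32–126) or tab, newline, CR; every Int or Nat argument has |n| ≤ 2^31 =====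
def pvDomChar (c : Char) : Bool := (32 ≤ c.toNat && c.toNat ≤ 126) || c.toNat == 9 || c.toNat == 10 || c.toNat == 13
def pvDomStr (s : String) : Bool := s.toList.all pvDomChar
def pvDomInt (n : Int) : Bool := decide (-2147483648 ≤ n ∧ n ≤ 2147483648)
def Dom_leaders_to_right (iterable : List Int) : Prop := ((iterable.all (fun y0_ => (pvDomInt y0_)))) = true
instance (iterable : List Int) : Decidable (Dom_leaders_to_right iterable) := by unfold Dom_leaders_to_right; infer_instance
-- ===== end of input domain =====

-- B is an alternative re-implementation: a left-to-right monotonic stack (pop while the top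
-- is smaller than the new element), instead of A's right-to-left running-maximum pass + reversal.
-- The Python validation preamble (type checks / ValueError) lies outside the List Int domain.

-- ===== PORT A =====
def leaders_to_right (iterable : List Int) : List (Int × Int) :=
  -- leaders_list = []; if len > 0: append (iterable[-1], len-1)
  let n : Int := iterable.length
  let leaders0 : List (Int × Int) :=
    if 0 < iterable.length then [(PySem.List.pyGetD iterable (-1) 0, n - 1)] else []
  -- for i in range(len(iterable)-2, -1, -1): if iterable[i] >= leaders_list[-1][0]: append
  let leaders :=
    (PySem.List.pyRange (n - 2) (-1) (-1)).foldl
      (fun acc i =>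
        if PySem.List.pyGetD iterable i 0 ≥ (PySem.List.pyGetD acc (-1) ((0 : Int), (0 : Int))).1
        then acc ++ [(PySem.List.pyGetD iterable i 0, i)]
        else acc)
      leaders0
  -- return list(reversed(leaders_list))
  leaders.reverse

-- ===== PORT B =====
-- while stack and stack[-1][0] < value: stack.pop()
def popWhileLt (v : Int) (st : List (Int × Int)) : List (Int × Int) :=
  match h : st.getLast? with
  | none => st
  | some p =>
    if p.1 < v then popWhileLt v st.dropLast else st
termination_by st.length
decreasing_by
  have hne : st ≠ [] := by intro hnil; subst hnil; simp at h
  have := List.length_pos_iff.mpr hne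
  simp [List.length_dropLast]; omega

def leaders_to_right_alt (iterable : List Int) : List (Int × Int) :=
  -- for index, value in enumerate(iterable): pop smaller tops, then append (value, index)
  (PySem.List.enumerate iterable).foldl
    (fun stack iv => popWhileLt iv.2 stack ++ [(iv.2, iv.1)]) []

-- ===== PRECONDITION & SPEC =====
def Spec_leaders_to_right (iterable : List Int) (out : List (Int × Int)) : Prop := out = leaders_to_right_alt iterable
instance (iterable : List Int) (out : List (Int × Int)) : Decidable (Spec_leaders_to_right iterable out) := by unfold Spec_leaders_to_right; infer_instance

-- ===== CLAIM (what is proved, stated in full; the proofs are below) =====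
def Claim_equal_leaders_to_right : Prop := ∀ (iterable : List Int), Dom_leaders_to_right iterable → Spec_leaders_to_right iterable (leaders_to_right iterable)

-- ===== LEMMAS AND PROOFS =====

-- `iterable[k]` is a leader iff it is >= every element of its right suffix (B's test at index k).
def leadB (xs : List Int) (k : Nat) : Bool :=
  (xs.drop (k + 1)).all (fun x => decide (xs.getD k 0 ≥ x))

-- the leaders among indices 0..m-1, in increasing index order
def leadersUpTo (xs : List Int) (m : Nat) : List (Int × Int) :=
  ((List.range m).filter (leadB xs)).map (fun k => (xs.getD k 0, (k : Int)))

-- A's loop, recast on a Nat counter: loopA xs m acc processes indices m-1, m-2, …, 0.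
def loopA (xs : List Int) : Nat → List (Int × Int) → List (Int × Int)
  | 0, acc => acc
  | k + 1, acc =>
      loopA xs k
        (if xs.getD k 0 ≥ (PySem.List.pyGetD acc (-1) ((0 : Int), (0 : Int))).1
         then acc ++ [(xs.getD k 0, (k : Int))]
         else acc)

theorem pyGetD_neg_one {α : Type} (xs : List α) (d : α) :
    PySem.List.pyGetD xs (-1) d = xs.getLast?.getD d := by
  cases xs with
  | nil => rfl
  | cons x xs =>
    simp [PySem.List.pyGetD, PySem.List.pyGet?, PySem.List.pyIdx?, List.getLast?_eq_getElem?]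

theorem leadersUpTo_succ (xs : List Int) (m : Nat) :
    leadersUpTo xs (m + 1) =
      leadersUpTo xs m ++ (if leadB xs m then [(xs.getD m 0, (m : Int))] else []) := by
  unfold leadersUpTo
  rw [List.range_succ, List.filter_append, List.map_append]
  by_cases h : leadB xs m <;> simp [h]

theorem leadB_last (xs : List Int) (h : xs ≠ []) : leadB xs (xs.length - 1) = true := by
  unfold leadB
  have : xs.length - 1 + 1 = xs.length := Nat.succ_pred_eq_of_pos (List.length_pos_iff.mpr h)
  simp [this]

-- A's fold over range(m-1, -1, -1) is loopA xs m.
theorem foldA_eq (xs : List Int) (m : Nat) (acc : List (Int × Int)) :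
    (PySem.List.pyRange ((m : Int) - 1) (-1) (-1)).foldl
      (fun acc i =>
        if PySem.List.pyGetD xs i 0 ≥ (PySem.List.pyGetD acc (-1) ((0 : Int), (0 : Int))).1
        then acc ++ [(PySem.List.pyGetD xs i 0, i)]
        else acc) acc = loopA xs m acc := by
  induction m generalizing acc with
  | zero => rw [PySem.List.pyRange_neg_one_eq_nil (by norm_num)]; rfl
  | succ m ih =>
    have hcons : PySem.List.pyRange (((m + 1 : Nat) : Int) - 1) (-1) (-1) =
        (((m + 1 : Nat) : Int) - 1) :: PySem.List.pyRange (((m + 1 : Nat) : Int) - 1 - 1) (-1) (-1) :=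
      PySem.List.pyRange_neg_one_cons (by push_cast; omega)
    have h1 : ((m + 1 : Nat) : Int) - 1 = (m : Int) := by push_cast; ring
    rw [hcons, h1, List.foldl_cons, ih]
    conv_rhs => rw [loopA]
    simp only [PySem.List.pyGetD_natCast]

-- the running invariant: the last appended pair carries the maximum of the unprocessed-side suffix
theorem loopA_eq (xs : List Int) (m : Nat) (acc : List (Int × Int)) (p : Int × Int)
    (hlast : acc.getLast? = some p)
    (hmem : p.1 ∈ xs.drop m) (hub : ∀ x ∈ xs.drop m, x ≤ p.1) :
    loopA xs m acc = acc ++ (leadersUpTo xs m).reverse := by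
  induction m generalizing acc p with
  | zero => simp [loopA, leadersUpTo]
  | succ m ih =>
    have hmlt : m < xs.length := by
      by_contra h
      rw [List.drop_eq_nil_of_le (by omega)] at hmem
      exact absurd hmem (List.not_mem_nil)
    have hdrop : xs.drop m = xs[m] :: xs.drop (m + 1) := List.drop_eq_getElem_cons hmlt
    have hget : xs.getD m 0 = xs[m] := List.getD_eq_getElem xs 0 hmlt
    have hlastv : PySem.List.pyGetD acc (-1) ((0 : Int), (0 : Int)) = p := by
      rw [pyGetD_neg_one, hlast]; rfl
    -- the loop's test equals B's suffix test
    have hcond : (xs.getD m 0 ≥ p.1) ↔ leadB xs m = true := by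
      unfold leadB
      simp only [List.all_eq_true, decide_eq_true_eq]
      constructor
      · intro h x hx; exact le_trans (hub x hx) h
      · intro h; exact h p.1 hmem
    unfold loopA
    rw [hlastv, leadersUpTo_succ, List.reverse_append]
    by_cases hc : xs.getD m 0 ≥ p.1
    · have hlB : leadB xs m = true := hcond.mp hc
      rw [if_pos hc,
          ih (acc ++ [(xs.getD m 0, (m : Int))]) (xs.getD m 0, (m : Int))
            List.getLast?_concat
            (by show xs.getD m 0 ∈ xs.drop m
                rw [hget, hdrop]; exact List.mem_cons_self)
            (by intro x hx
                show x ≤ xs.getD m 0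
                rw [hdrop] at hx
                rcases List.mem_cons.mp hx with h' | h'
                · rw [hget, h']
                · exact le_trans (hub x h') hc)]
      simp [hlB]
    · have hlB : leadB xs m = false := by
        by_contra h
        exact hc (hcond.mpr (by simpa using h))
      rw [if_neg hc,
          ih acc p hlast
            (by rw [hdrop]; exact List.mem_cons_of_mem _ hmem)
            (by intro x hx
                rw [hdrop] at hx
                rcases List.mem_cons.mp hx with h' | h'
                · rw [h', ← hget]; exact le_of_not_ge hc
                · exact hub x h')]
      simp [hlB]

theorem popWhileLt_nil (v : Int) : popWhileLt v [] = [] := by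
  rw [popWhileLt]
  split
  · rfl
  · next p h => simp at h

theorem popWhileLt_concat (v : Int) (st : List (Int × Int)) (p : Int × Int) :
    popWhileLt v (st ++ [p]) = if p.1 < v then popWhileLt v st else st ++ [p] := by
  rw [popWhileLt]
  split
  · next h => simp at h
  · next p' h =>
    rw [List.getLast?_concat] at h
    cases h
    simp

theorem popWhileLt_eq_filter (v : Int) (st : List (Int × Int))
    (h : st.Pairwise (fun a b => b.1 ≤ a.1)) :
    popWhileLt v st = st.filter (fun p => decide (v ≤ p.1)) := by
  induction st using List.reverseRecOn with
  | nil => simp [popWhileLt_nil]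
  | append_singleton st p ih =>
    rw [popWhileLt_concat, List.filter_append]
    rcases List.pairwise_append.mp h with ⟨hst, -, hrel⟩
    by_cases hc : p.1 < v
    · rw [if_pos hc, ih hst]
      simp [not_le.mpr hc]
    · rw [if_neg hc]
      have hv : v ≤ p.1 := le_of_not_gt hc
      have hall : ∀ a ∈ st, v ≤ a.1 := fun a ha => le_trans hv (hrel a ha p (by simp))
      rw [List.filter_eq_self.mpr (by intro a ha; simpa using hall a ha)]
      simp [hv]

def leadP (xs : List Int) (m k : Nat) : Bool :=
  ((xs.take m).drop (k + 1)).all (fun x => decide (xs.getD k 0 ≥ x))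

def stackUpTo (xs : List Int) (m : Nat) : List (Int × Int) :=
  ((List.range m).filter (leadP xs m)).map (fun k => (xs.getD k 0, (k : Int)))

theorem leadP_succ (xs : List Int) (m k : Nat) (hm : m < xs.length) (hk : k < m) :
    leadP xs (m + 1) k = (leadP xs m k && decide (xs.getD k 0 ≥ xs.getD m 0)) := by
  unfold leadP
  have htake : xs.take (m + 1) = xs.take m ++ [xs[m]] := by
    rw [List.take_add_one, List.getElem?_eq_getElem hm]; rfl
  have hlen : (xs.take m).length = m := List.length_take_of_le (le_of_lt hm)
  rw [htake, List.drop_append_of_le_length (by omega), List.all_append]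
  simp [ge_iff_le, List.getElem?_eq_getElem hm]

theorem leadP_self (xs : List Int) (m : Nat) : leadP xs (m + 1) m = true := by
  unfold leadP
  rw [List.drop_eq_nil_of_le (by simpa using Nat.min_le_left (m+1) xs.length)]
  rfl

theorem stackUpTo_succ (xs : List Int) (m : Nat) (hm : m < xs.length) :
    stackUpTo xs (m + 1) =
      (stackUpTo xs m).filter (fun p => decide (xs.getD m 0 ≤ p.1)) ++
        [(xs.getD m 0, (m : Int))] := by
  unfold stackUpTo
  rw [List.range_succ, List.filter_append, List.map_append,
      List.filter_congr (fun k hk => leadP_succ xs m k hm (List.mem_range.mp hk))]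
  congr 1
  · rw [List.filter_map]
    congr 1
    conv_rhs => rw [List.filter_filter]
    exact List.filter_congr (fun k hk => by simp [Function.comp, ge_iff_le, Bool.and_comm])
  · simp [leadP_self]

theorem stackUpTo_pairwise (xs : List Int) (m : Nat) (hm : m ≤ xs.length) :
    (stackUpTo xs m).Pairwise (fun a b => b.1 ≤ a.1) := by
  induction m with
  | zero => simp [stackUpTo]
  | succ m ih =>
    rw [stackUpTo_succ xs m (by omega)]
    rw [List.pairwise_append]
    refine ⟨List.Pairwise.sublist List.filter_sublist (ih (by omega)), by simp, ?_⟩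
    intro a ha b hb
    rw [List.mem_singleton] at hb
    subst hb
    exact (by simpa using List.of_mem_filter ha : xs.getD m 0 ≤ a.1)

theorem enumerate_append {α : Type} (xs ys : List α) (s : Int) :
    PySem.List.enumerate (xs ++ ys) s =
      PySem.List.enumerate xs s ++ PySem.List.enumerate ys (s + xs.length) := by
  induction xs generalizing s with
  | nil => simp [PySem.List.enumerate_nil]
  | cons x xs ih =>
    simp only [List.cons_append, PySem.List.enumerate_cons, ih (s + 1), List.length_cons]
    rw [show s + 1 + (xs.length : Int) = s + ((xs.length : Int) + 1) by ring]
    push_cast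
    ring_nf

theorem foldStack_eq (xs : List Int) (m : Nat) (hm : m ≤ xs.length) :
    (PySem.List.enumerate (xs.take m) 0).foldl
      (fun stack iv => popWhileLt iv.2 stack ++ [(iv.2, iv.1)]) [] = stackUpTo xs m := by
  induction m with
  | zero => simp [PySem.List.enumerate_nil, stackUpTo]
  | succ m ih =>
    have hmlt : m < xs.length := by omega
    have htake : xs.take (m + 1) = xs.take m ++ [xs[m]] := by
      rw [List.take_add_one, List.getElem?_eq_getElem hmlt]; rfl
    rw [htake, enumerate_append, List.foldl_append, ih (by omega)]
    simp only [PySem.List.enumerate_cons, PySem.List.enumerate_nil, List.foldl_cons,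
      List.foldl_nil, List.length_take_of_le (le_of_lt hmlt)]
    rw [popWhileLt_eq_filter _ _ (stackUpTo_pairwise xs m (by omega)),
        stackUpTo_succ xs m hmlt]
    simp [List.getElem?_eq_getElem hmlt]

theorem alt_eq_stack (xs : List Int) :
    leaders_to_right_alt xs = stackUpTo xs xs.length := by
  unfold leaders_to_right_alt
  rw [← foldStack_eq xs xs.length le_rfl, List.take_length]


theorem stackUpTo_length (xs : List Int) :
    stackUpTo xs xs.length = leadersUpTo xs xs.length := by
  unfold stackUpTo leadersUpTo leadP leadB
  simp only [List.take_length]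

theorem both_eq (xs : List Int) : leaders_to_right xs = leaders_to_right_alt xs := by
  unfold leaders_to_right
  rw [alt_eq_stack, stackUpTo_length]
  cases xs with
  | nil => simp [leadersUpTo]
  | cons y ys =>
    set xs := y :: ys with hxs
    have hne : xs ≠ [] := by simp [hxs]
    have hpos : 0 < xs.length := List.length_pos_iff.mpr hne
    simp only [hpos, if_pos]
    have hn1 : ((xs.length : Int) - 2) = ((xs.length - 1 : Nat) : Int) - 1 := by
      push_cast [Nat.cast_sub (by omega : 1 ≤ xs.length)]; ring
    rw [hn1, foldA_eq]
    have hlast0 : PySem.List.pyGetD xs (-1) 0 = xs.getLast hne := by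
      rw [pyGetD_neg_one, List.getLast?_eq_some_getLast hne]; rfl
    have hdropl : xs.drop (xs.length - 1) = [xs.getLast hne] := List.drop_length_sub_one hne
    rw [loopA_eq xs (xs.length - 1) _ (PySem.List.pyGetD xs (-1) 0, (xs.length : Int) - 1)
          rfl
          (by show PySem.List.pyGetD xs (-1) 0 ∈ xs.drop (xs.length - 1)
              rw [hlast0, hdropl]; exact List.mem_cons_self)
          (by intro x hx
              show x ≤ PySem.List.pyGetD xs (-1) 0
              rw [hdropl] at hx
              rw [hlast0]
              exact le_of_eq (List.mem_singleton.mp hx))]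
    have hget : PySem.List.pyGetD xs (-1) 0 = xs.getD (xs.length - 1) 0 := by
      rw [hlast0, List.getLast_eq_getElem, List.getD_eq_getElem xs 0 (by omega)]
    have hsplit : leadersUpTo xs xs.length =
        leadersUpTo xs (xs.length - 1) ++ [(xs.getD (xs.length - 1) 0, ((xs.length - 1 : Nat) : Int))] := by
      have : xs.length = (xs.length - 1) + 1 := by omega
      rw [this, leadersUpTo_succ, ← this, leadB_last xs hne]
      simp
    rw [hsplit, List.reverse_append]
    simp only [List.reverse_cons, List.reverse_nil, List.nil_append, List.reverse_reverse]
    rw [hget]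
    congr 2
    push_cast [Nat.cast_sub (by omega : 1 ≤ xs.length)]
    ring

-- ===== VERDICT (by name: the statement is the Claim_ definition above) =====
theorem leaders_to_right_spec : Claim_equal_leaders_to_right := by
  intro iterable _
  unfold Spec_leaders_to_right
  exact both_eq iterable
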